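-- pv_equiv track=rewrite | github.com/pypi-data/pypi-mirror-400 | packages/fluxem/fluxem-1.0.1.tar.gz/fluxem-1.0.1/fluxem/domains/music/atonal.py | invariant_under_Tn
-- ===== SOURCE A (Python) =====
-- from typing import Any, List, Tuple
--
-- def invariant_under_Tn(pcs: List[int]) -> List[int]:
--     """
--     Find all transposition invariants (Tn where Tn(S) = S).
--
--     Tests invariance under transposition.
--     """
--     invariants = []
--
--     sorted_pcs = sorted(set(pc % 12 for pc in pcs))
--
--     for n in range(12):
--         transposed = sorted([(pc + n) % 12 for pc in sorted_pcs])
--         if transposed == sorted_pcs: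
--             invariants.append(n)
--
--     return invariants
-- ===== SOURCE B (Python) =====
-- def invariant_under_Tn(pcs):
--     """
--     Find all transposition invariants (Tn where Tn(S) = S).
--
--     Computed by intersecting difference sets: n maps S into S for every
--     element s iff n is in {(u - s) % 12 for u in S} for every s in S.
--     """
--     S = set(pc % 12 for pc in pcs)
--     valid = set(range(12))
--     for s in S:
--         valid &= {(u - s) % 12 for u in S}
--     return sorted(valid)
-- ===== Notes on version B (the rewrite author's own statement) =====
-- stated objective: alternative
-- what changed: Instead of testing each of the 12 transpositions by transposing and re-sorting the whole set, B intersects difference sets: starting from {0..11}, for each s in S it keeps only the shifts n with (u-s)%12 = n for some u in S, then sorts the surviving shifts.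
import Mathlib
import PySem

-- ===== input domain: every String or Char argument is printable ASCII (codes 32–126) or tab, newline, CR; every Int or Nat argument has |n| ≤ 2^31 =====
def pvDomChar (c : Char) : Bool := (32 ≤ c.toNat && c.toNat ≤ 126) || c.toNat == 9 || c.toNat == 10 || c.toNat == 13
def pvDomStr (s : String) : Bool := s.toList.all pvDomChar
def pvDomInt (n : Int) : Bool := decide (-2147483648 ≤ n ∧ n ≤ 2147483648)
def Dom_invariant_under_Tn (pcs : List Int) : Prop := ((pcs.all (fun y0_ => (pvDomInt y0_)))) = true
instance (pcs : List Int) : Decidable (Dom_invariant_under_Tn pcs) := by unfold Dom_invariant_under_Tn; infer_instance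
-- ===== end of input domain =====

-- B computes the invariant transpositions by intersecting difference sets instead of testing each of
-- the 12 shifts by transposing and re-sorting the set; same exact result (objective: alternative).

-- ===== PORT A =====
def invariant_under_Tn (pcs : List Int) : List Int :=
  let sorted_pcs :=
    PySem.List.sorted (PySem.Set.ofList (pcs.map (fun pc => PySem.Int.mod pc 12))) (fun x => x)
  (PySem.List.pyRange 0 12 1).foldl (fun invariants n =>
    let transposed :=
      PySem.List.sorted (sorted_pcs.map (fun pc => PySem.Int.mod (pc + n) 12)) (fun x => x)
    if transposed == sorted_pcs then invariants ++ [n] else invariants) []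
-- ===== PORT B =====
def invariant_under_Tn_alt (pcs : List Int) : List Int :=
  let S : PySem.Set Int := PySem.Set.ofList (pcs.map (fun pc => PySem.Int.mod pc 12))
  let valid : PySem.Set Int :=
    S.foldl (fun valid s =>
      PySem.Set.inter valid (PySem.Set.ofList (S.map (fun u => PySem.Int.mod (u - s) 12))))
      (PySem.Set.ofList (PySem.List.pyRange 0 12 1))
  PySem.List.sorted valid (fun x => x)
-- ===== PRECONDITION & SPEC =====
def Spec_invariant_under_Tn (pcs : List Int) (out : List Int) : Prop := out = invariant_under_Tn_alt pcs
instance (pcs : List Int) (out : List Int) : Decidable (Spec_invariant_under_Tn pcs out) := by unfold Spec_invariant_under_Tn; infer_instance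

-- ===== CLAIM (what is proved, stated in full; the proofs are below) =====
def Claim_equal_invariant_under_Tn : Prop := ∀ (pcs : List Int), Dom_invariant_under_Tn pcs → Spec_invariant_under_Tn pcs (invariant_under_Tn pcs)

-- ===== LEMMAS AND PROOFS =====

-- B's intersection loop is a filter by membership in every difference set.
theorem foldl_inter_filter (D : Int → List Int) (l v : List Int) :
    l.foldl (fun v s => PySem.Set.inter v (D s)) v
      = v.filter (fun n => l.all (fun s => PySem.Set.contains (D s) n)) := by
  induction l generalizing v with
  | nil => simp
  | cons s t ih =>
      rw [List.foldl_cons, ih]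
      show (List.filter _ v).filter _ = _
      rw [List.filter_filter]
      simp only [List.all_cons]
      exact List.filter_congr fun a _ => by rw [Bool.and_comm]
-- n is an invariant transposition iff it shifts every residue back into the residue set.
theorem perm_iff_maps_into (L : List Int) (n : Int) (hnod : L.Nodup)
    (hb : ∀ x ∈ L, 0 ≤ x ∧ x < 12) (hn : 0 ≤ n ∧ n < 12) :
    (L.map (fun pc => PySem.Int.mod (pc + n) 12)).Perm L
      ↔ ∀ s ∈ L, ∃ u ∈ L, PySem.Int.mod (u - s) 12 = n := by
  simp only [PySem.Int.mod_eq_emod_of_pos (by norm_num : (0:Int) < 12)]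
  constructor
  · intro hp s hs
    refine ⟨(s + n) % 12, hp.mem_iff.mp (List.mem_map_of_mem hs), ?_⟩
    obtain ⟨h1, h2⟩ := hb s hs; omega
  · intro H
    have hsub : (L.map (fun pc => (pc + n) % 12)) ⊆ L := by
      intro x hx
      obtain ⟨s, hs, rfl⟩ := List.mem_map.mp hx
      obtain ⟨u, hu, hue⟩ := H s hs
      have h1 := hb s hs; have h2 := hb u hu
      have : (s + n) % 12 = u := by omega
      rwa [this]
    have hmn : (L.map (fun pc => (pc + n) % 12)).Nodup := by
      refine List.Nodup.map_on ?_ hnod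
      intro x hx y hy hxy
      have h1 := hb x hx; have h2 := hb y hy
      omega
    exact (List.subperm_of_subset hmn hsub).perm_of_length_le (by simp)

-- A and B both compute the filter of 0..11 by "n maps the residue set into itself".
theorem invariant_under_Tn_eq (pcs : List Int) :
    invariant_under_Tn pcs = invariant_under_Tn_alt pcs := by
  simp only [invariant_under_Tn, invariant_under_Tn_alt]
  set S := PySem.Set.ofList (pcs.map (fun pc => PySem.Int.mod pc 12)) with hS
  set L := PySem.List.sorted S (fun x => x) with hL
  -- shared facts
  have hb : ∀ x ∈ S, 0 ≤ x ∧ x < 12 := by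
    intro x hx
    obtain ⟨pc, _, rfl⟩ := List.mem_map.mp ((PySem.Set.mem_ofList _ _).mp hx)
    exact ⟨PySem.Int.mod_nonneg _ (by norm_num), PySem.Int.mod_lt _ (by norm_num)⟩
  have hpw : L.Pairwise (· < ·) := PySem.List.sorted_ofList_pairwise_lt _
  have hnod : L.Nodup := hpw.imp ne_of_lt
  have hLmem : ∀ x, x ∈ L ↔ x ∈ S := fun x => PySem.List.mem_sorted _ _ _ x
  have hbL : ∀ x ∈ L, 0 ≤ x ∧ x < 12 := fun x hx => hb x ((hLmem x).mp hx)
  have hLsorted : PySem.List.sorted L (fun x => x) = L :=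
    PySem.List.sorted_eq_self_of_pairwise _ _ (hpw.imp le_of_lt)
  -- A side
  have hA := PySem.List.foldl_append_if
      (fun n => (PySem.List.sorted (L.map (fun pc => PySem.Int.mod (pc + n) 12)) (fun x => x) == L))
      id (PySem.List.pyRange 0 12 1) []
  simp only [id_eq, List.map_id, List.nil_append] at hA
  rw [hA]
  -- B side
  rw [foldl_inter_filter (fun s => PySem.Set.ofList (S.map (fun u => PySem.Int.mod (u - s) 12)))]
  have hrange : PySem.Set.ofList (PySem.List.pyRange 0 12 1) = PySem.List.pyRange 0 12 1 :=
    PySem.Set.ofList_eq_self_of_nodup _ (PySem.List.nodup_pyRange_one 0 12)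
  rw [hrange]
  have hfpw : (List.filter (fun n => S.all fun s =>
      PySem.Set.contains (PySem.Set.ofList (S.map (fun u => PySem.Int.mod (u - s) 12))) n)
      (PySem.List.pyRange 0 12 1)).Pairwise (fun a b => a ≤ b) :=
    (List.Pairwise.sublist List.filter_sublist (PySem.List.pairwise_lt_pyRange_one 0 12)).imp le_of_lt
  rw [PySem.List.sorted_eq_self_of_pairwise _ _ hfpw]
  -- pointwise
  apply List.filter_congr
  intro n hn
  have hn' : 0 ≤ n ∧ n < 12 := by
    have := PySem.List.mem_pyRange_one.mp hn; omega
  rw [Bool.eq_iff_iff, beq_iff_eq]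
  constructor
  · intro h
    have hperm : (L.map (fun pc => PySem.Int.mod (pc + n) 12)).Perm L :=
      (PySem.List.sorted_id_eq_sorted_id_iff_perm _ _).mp (h.trans hLsorted.symm)
    rw [List.all_eq_true]
    intro s hs
    obtain ⟨u, hu, hue⟩ := (perm_iff_maps_into L n hnod hbL hn').mp hperm s ((hLmem s).mpr hs)
    rw [PySem.Set.contains_iff, PySem.Set.mem_ofList]
    exact List.mem_map.mpr ⟨u, (hLmem u).mp hu, hue⟩
  · intro h
    have H : ∀ s ∈ L, ∃ u ∈ L, PySem.Int.mod (u - s) 12 = n := by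
      intro s hs
      have := List.all_eq_true.mp h s ((hLmem s).mp hs)
      rw [PySem.Set.contains_iff, PySem.Set.mem_ofList] at this
      obtain ⟨u, hu, hue⟩ := List.mem_map.mp this
      exact ⟨u, (hLmem u).mpr hu, hue⟩
    exact ((PySem.List.sorted_id_eq_sorted_id_iff_perm _ _).mpr
      ((perm_iff_maps_into L n hnod hbL hn').mpr H)).trans hLsorted

-- ===== VERDICT (by name: the statement is the Claim_ definition above) =====
theorem invariant_under_Tn_spec : Claim_equal_invariant_under_Tn := by
  intro pcs _
  exact invariant_under_Tn_eq pcs
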